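-- pv_equiv track=rewrite | github.com/BllueAiur/HDsEMG | utils/preprocess.py | consecutive_segments
-- ===== SOURCE A (Python) =====
-- def consecutive_segments(binary_signal):
--     """
--     Compute consecutive segment lengths for a binary signal.
--     Returns a list of tuples (segment_length, value).
--     """
--     segments = []
--     if len(binary_signal) == 0:
--         return segments
--     current_val = binary_signal[0]
--     count = 1
--     for val in binary_signal[1:]:
--         if val == current_val:
--             count += 1
--         else:
--             segments.append((count, current_val))
--             current_val = val
--             count = 1
--     segments.append((count, current_val))
--     return segments
-- ===== SOURCE B (Python) =====
-- def consecutive_segments(binary_signal):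
--     """
--     Compute consecutive segment lengths for a binary signal.
--     Returns a list of tuples (segment_length, value).
--     Two-pointer span scan: for each run, advance j to the run's end,
--     emit (j - i, value), jump i to j. No running counter state.
--     """
--     segments = []
--     n = len(binary_signal)
--     i = 0
--     while i < n:
--         head = binary_signal[i]
--         j = i + 1
--         while j < n and binary_signal[j] == head:
--             j += 1
--         segments.append((j - i, head))
--         i = j
--     return segments
-- ===== Notes on version B (the rewrite author's own statement) =====
-- stated objective: alternative
-- what changed: Replaces the stateful running-counter fold (current value + count carried across every element, segment flushed on change) with a two-pointer span scan: an inner loop finds the end of each run and the segment is emitted as an index difference, the outer pointer jumping run by run.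
import Mathlib
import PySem

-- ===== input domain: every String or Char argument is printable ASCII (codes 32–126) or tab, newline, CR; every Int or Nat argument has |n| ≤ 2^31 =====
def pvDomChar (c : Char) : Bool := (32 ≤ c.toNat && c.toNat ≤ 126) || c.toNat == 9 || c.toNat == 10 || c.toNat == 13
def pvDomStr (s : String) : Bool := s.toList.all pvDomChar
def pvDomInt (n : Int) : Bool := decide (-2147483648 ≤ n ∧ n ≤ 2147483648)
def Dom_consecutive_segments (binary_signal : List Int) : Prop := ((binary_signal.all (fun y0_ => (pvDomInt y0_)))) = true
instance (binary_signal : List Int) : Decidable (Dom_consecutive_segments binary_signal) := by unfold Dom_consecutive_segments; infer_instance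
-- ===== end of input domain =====

-- B replaces A's running-counter fold with a two-pointer span scan (same O(n) cost, different decomposition).


-- ===== PORT A =====
-- A's loop: carry (segments, current_val, count) across the tail, flush on change.
def aGo : List Int → Int → Int → List (Int × Int) → List (Int × Int)
  | [], cv, c, segs => segs ++ [(c, cv)]
  | v :: rest, cv, c, segs =>
    if v = cv then aGo rest cv (c + 1) segs
    else aGo rest v 1 (segs ++ [(c, cv)])

def consecutive_segments (binary_signal : List Int) : List (Int × Int) :=
  match binary_signal with
  | [] => []
  | x :: xs => aGo xs x 1 []

-- ===== PORT B =====
-- B's inner while-loop: advance j past the elements equal to head.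
def bInner (s : List Int) (n : Nat) (head : Int) (j : Nat) : Nat :=
  if j < n ∧ s.getD j 0 = head then bInner s n head (j + 1) else j
termination_by n - j
decreasing_by omega

theorem bInner_ge (s : List Int) (n : Nat) (head : Int) (j : Nat) : j ≤ bInner s n head j := by
  rw [bInner]
  split
  · exact le_trans (by omega) (bInner_ge s n head (j + 1))
  · exact le_refl j
termination_by n - j
decreasing_by rename_i h; omega

-- B's outer while-loop: one segment per run, i jumps to j.
def bOuter (s : List Int) (n : Nat) (i : Nat) : List (Int × Int) :=
  if h : i < n then
    (((bInner s n (s.getD i 0) (i + 1) : Int) - (i : Int)), s.getD i 0)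
      :: bOuter s n (bInner s n (s.getD i 0) (i + 1))
  else []
termination_by n - i
decreasing_by have := bInner_ge s n (s.getD i 0) (i + 1); omega

def consecutive_segments_alt (binary_signal : List Int) : List (Int × Int) :=
  bOuter binary_signal binary_signal.length 0

-- ===== PRECONDITION & SPEC =====
def Spec_consecutive_segments (binary_signal : List Int) (out : List (Int × Int)) : Prop := out = consecutive_segments_alt binary_signal
instance (binary_signal : List Int) (out : List (Int × Int)) : Decidable (Spec_consecutive_segments binary_signal out) := by unfold Spec_consecutive_segments; infer_instance

-- ===== CLAIM (what is proved, stated in full; the proofs are below) =====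
def Claim_equal_consecutive_segments : Prop := ∀ (binary_signal : List Int), Dom_consecutive_segments binary_signal → Spec_consecutive_segments binary_signal (consecutive_segments binary_signal)

-- ===== LEMMAS AND PROOFS =====

-- Common reference form: run-length encoding by takeWhile/dropWhile.
def rle : List Int → List (Int × Int)
  | [] => []
  | x :: xs =>
    ((((xs.takeWhile (· == x)).length : Int) + 1), x) :: rle (xs.dropWhile (· == x))
termination_by l => l.length
decreasing_by simpa [Nat.lt_succ_iff] using List.length_dropWhile_le (· == _) _

theorem aGo_eq (xs : List Int) : ∀ (cv c : Int) (segs : List (Int × Int)),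
    aGo xs cv c segs
      = segs ++ (c + ((xs.takeWhile (· == cv)).length : Int), cv) :: rle (xs.dropWhile (· == cv)) := by
  induction xs with
  | nil => intro cv c segs; simp [aGo, rle]
  | cons v rest ih =>
    intro cv c segs
    by_cases h : v = cv
    · simp [aGo, h, ih]
      ring_nf
    · simp [aGo, h, ih, rle]
      ring_nf

theorem a_eq_rle (s : List Int) : consecutive_segments s = rle s := by
  cases s with
  | nil => simp [consecutive_segments, rle]
  | cons x xs => simp [consecutive_segments, aGo_eq, rle]; ring_nf

theorem bInner_eq (s : List Int) (head : Int) (j : Nat) :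
    bInner s s.length head j = j + ((s.drop j).takeWhile (· == head)).length := by
  rw [bInner]
  by_cases hj : j < s.length
  · have hdrop : s.drop j = s[j] :: s.drop (j + 1) := List.drop_eq_getElem_cons hj
    have hgd : s.getD j 0 = s[j] := List.getD_eq_getElem s 0 hj
    by_cases hv : s[j] = head
    · rw [if_pos ⟨hj, by rw [hgd, hv]⟩, bInner_eq s head (j + 1)]
      rw [hdrop]
      simp [hv]
      omega
    · rw [if_neg (by rw [hgd]; exact fun h => hv h.2)]
      rw [hdrop]
      simp [hv]
  · rw [if_neg (fun h => hj h.1)]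
    rw [List.drop_eq_nil_of_le (by omega)]
    simp
termination_by s.length - j
decreasing_by omega

theorem bOuter_eq (s : List Int) (i : Nat) : bOuter s s.length i = rle (s.drop i) := by
  rw [bOuter]
  by_cases hi : i < s.length
  · rw [dif_pos hi]
    have hgd : s.getD i 0 = s[i] := List.getD_eq_getElem s 0 hi
    have hdrop : s.drop i = s[i] :: s.drop (i + 1) := List.drop_eq_getElem_cons hi
    rw [hgd, bInner_eq]
    set t := ((s.drop (i + 1)).takeWhile (· == s[i])).length with ht
    have hdw : (s.drop (i + 1)).dropWhile (· == s[i]) = s.drop (i + 1 + t) := by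
      calc (s.drop (i + 1)).dropWhile (· == s[i])
          = (((s.drop (i + 1)).takeWhile (· == s[i])
              ++ (s.drop (i + 1)).dropWhile (· == s[i]))).drop t := by
            rw [ht, List.drop_left]
        _ = (s.drop (i + 1)).drop t := by
            rw [List.takeWhile_append_dropWhile]
        _ = s.drop (i + 1 + t) := List.drop_drop
    rw [bOuter_eq s (i + 1 + t), hdrop, rle, hdw]
    have harith : ((i + 1 + t : Nat) : Int) - (i : Int) = (t : Int) + 1 := by
      push_cast; ring
    rw [harith]
  · rw [dif_neg hi, List.drop_eq_nil_of_le (by omega), rle]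
termination_by s.length - i
decreasing_by omega

-- ===== VERDICT (by name: the statement is the Claim_ definition above) =====
theorem consecutive_segments_spec : Claim_equal_consecutive_segments := by
  intro s _
  unfold Spec_consecutive_segments consecutive_segments_alt
  rw [a_eq_rle, bOuter_eq]
  rfl
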